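-- pv_equiv track=rewrite | github.com/KingWitherBrine/usaco | usaco_notlast_II.py | solve
-- ===== SOURCE A (Python) =====
-- def solve(n, matrix):
--     # find total production of cows
--     logs = {}
--     for cow, value in matrix:
--         logs[cow] = logs.get(cow, 0) + value
--     # find min values and change to inf
--     min_val = logs[min(logs, key=lambda k: logs[k])]
--     for cow, value in logs.items():
--         if value == min_val:
--             logs[cow] = float("inf")
--     # find second smallest val and check for duplicates
--     second_min_key = min(logs, key=lambda k: logs[k])
--     for cow, value in logs.items():
--         if value == logs[second_min_key] and cow != second_min_key:
--             return "Tie"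
--     return second_min_key
-- ===== SOURCE B (Python) =====
-- def solve(n, matrix):
--     totals = {}
--     for cow, value in matrix:
--         totals[cow] = totals.get(cow, 0) + value
--     ordered = sorted(totals.items(), key=lambda kv: kv[1])
--     min_val = ordered[0][1]
--     tail = [kv for kv in ordered if kv[1] != min_val]
--     block = tail if tail else ordered
--     if len(block) > 1 and block[1][1] == block[0][1]:
--         return "Tie"
--     return block[0][0]
-- ===== Notes on version B (the rewrite author's own statement) =====
-- stated objective: alternative
-- what changed: B sorts the per-cow totals by value once and reads the answer off the sorted list (drop the leading minimal block, then compare the first two remaining entries), instead of A's overwrite-minima-with-inf followed by a fresh argmin scan and a duplicate scan.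
import Mathlib
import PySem

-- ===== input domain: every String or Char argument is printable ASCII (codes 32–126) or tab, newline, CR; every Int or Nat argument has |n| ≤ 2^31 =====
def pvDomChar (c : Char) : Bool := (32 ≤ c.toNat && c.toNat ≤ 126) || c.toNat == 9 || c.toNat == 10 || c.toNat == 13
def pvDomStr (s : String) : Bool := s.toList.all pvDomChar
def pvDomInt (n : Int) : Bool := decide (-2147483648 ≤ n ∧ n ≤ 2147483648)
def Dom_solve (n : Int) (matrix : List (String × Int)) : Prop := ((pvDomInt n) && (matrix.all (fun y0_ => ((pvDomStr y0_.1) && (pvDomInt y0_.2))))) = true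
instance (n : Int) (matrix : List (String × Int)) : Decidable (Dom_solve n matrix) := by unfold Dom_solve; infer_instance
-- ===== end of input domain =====

-- B replaces A's overwrite-minima-with-float('inf') + argmin rescan + duplicate scan by ONE sort of the
-- totals by value and a look at the first entries after the minimal block; return value only, no
-- observable mutation in either program.

-- ===== PORT A =====
-- 'none' stands for float('inf'); oLt is Python's '<' on int-or-inf values
def oLt : Option Int → Option Int → Bool
  | some x, some y => decide (x < y)
  | some _, none => true
  | none, _ => false

-- min(d, key=lambda k: d[k]) over a dict with unique keys = first pair carrying the minimal value,
-- transliterated as Python's min: keep the current best, replace it when a strictly smaller value appears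
def aMinPairI (p0 : String × Int) (rest : List (String × Int)) : String × Int :=
  rest.foldl (fun best q => if q.2 < best.2 then q else best) p0

def aMinPairO (p0 : String × Option Int) (rest : List (String × Option Int)) : String × Option Int :=
  rest.foldl (fun best q => if oLt q.2 best.2 then q else best) p0

-- the mutation loop: an entry whose value equals min_val becomes float('inf') (here: none)
def infMask (m : Int) (p : String × Int) : String × Option Int :=
  if p.2 == m then (p.1, (none : Option Int)) else (p.1, some p.2)

-- everything after the accumulation loop, on logs.items ([] is unreachable under Pre_solve:
-- Python's min raises ValueError on an empty dict)
def aBody : List (String × Int) → String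
  | [] => ""
  | p0 :: rest =>
    -- min_val = logs[min(logs, key=...)]: keys are unique, so the lookup yields the argmin pair's value
    let min_val := (aMinPairI p0 rest).2
    -- second_min_key with its value logs[second_min_key] (again the argmin pair's value, keys unique)
    let best := aMinPairO (infMask min_val p0) (rest.map (infMask min_val))
    -- the final loop returns "Tie" at the first matching cow; 'any' = "some iteration returns", same result
    if ((p0 :: rest).map (infMask min_val)).any (fun p => p.2 == best.2 && p.1 != best.1) then "Tie"
    else best.1

def solve (n : Int) (matrix : List (String × Int)) : String :=
  aBody ((matrix.foldl (fun d p => d.modify p.1 0 (fun v => v + p.2)) (PySem.Dict.empty : PySem.Dict String Int)).items)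

-- ===== PORT B =====
-- "Tie" if len(block) > 1 and block[1][1] == block[0][1] else block[0][0]  (block is never empty when reached)
def bPick : List (String × Int) → String
  | [] => ""
  | [b0] => b0.1
  | b0 :: b1 :: _ => if b1.2 == b0.2 then "Tie" else b0.1

-- everything after the accumulation loop, on totals.items ([] is unreachable under Pre_solve:
-- ordered[0] raises IndexError on an empty dict)
def bBody (items : List (String × Int)) : String :=
  -- ordered = sorted(totals.items(), key=lambda kv: kv[1]); min_val = ordered[0][1]
  match PySem.List.sorted items (fun kv => kv.2) false with
  | [] => ""
  | o0 :: orest =>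
    -- tail = [kv for kv in ordered if kv[1] != min_val]; block = tail if tail else ordered
    let tail := (o0 :: orest).filter (fun kv => kv.2 != o0.2)
    bPick (if tail.isEmpty then o0 :: orest else tail)

def solve_alt (n : Int) (matrix : List (String × Int)) : String :=
  bBody ((matrix.foldl (fun d p => d.modify p.1 0 (fun v => v + p.2)) (PySem.Dict.empty : PySem.Dict String Int)).items)

-- ===== PRECONDITION & SPEC =====
-- Pre_solve excludes only the empty matrix, on which A raises ValueError (min of an empty dict)
def Pre_solve (n : Int) (matrix : List (String × Int)) : Prop := matrix ≠ []
instance (n : Int) (matrix : List (String × Int)) : Decidable (Pre_solve n matrix) := by unfold Pre_solve; infer_instance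
def pvWitness_solve : Int × (List (String × Int)) := (3, [("bessie", 1), ("elsie", 2), ("bessie", 4)])

def Spec_solve (n : Int) (matrix : List (String × Int)) (out : String) : Prop := out = solve_alt n matrix
instance (n : Int) (matrix : List (String × Int)) (out : String) : Decidable (Spec_solve n matrix out) := by unfold Spec_solve; infer_instance

-- ===== CLAIM (what is proved, stated in full; the proofs are below) =====
def Claim_equal_solve : Prop := ∀ (n : Int) (matrix : List (String × Int)), Dom_solve n matrix → Pre_solve n matrix → Spec_solve n matrix (solve n matrix)

-- ===== LEMMAS AND PROOFS =====

-- proof-side reference computation: the answer phrased as "partition the totals into the minimal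
-- block and the rest"; both ports are proved equal to it
def minFold (v0 : Int) (vs : List Int) : Int := vs.foldl (fun m x => if x < m then x else m) v0

def refTie (winners : List String) : String :=
  if winners.length > 1 then "Tie" else winners.headD ""

def refSecond : List (String × Int) → List String → String
  | [], allCows => refTie allCows
  | o :: os, _ =>
      refTie (((o :: os).filter (fun p => p.2 == minFold o.2 (os.map (fun p => p.2)))).map (fun p => p.1))

def refBody : List (String × Int) → String
  | [] => ""
  | p0 :: rest =>
    refSecond ((p0 :: rest).filter (fun p => p.2 != minFold p0.2 (rest.map (fun p => p.2))))
      ((p0 :: rest).map (fun p => p.1))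

-- ordering facts about oLt (int-or-inf '<')
theorem oLt_irrefl (a : Option Int) : oLt a a = false := by
  cases a <;> simp [oLt]

theorem oLt_asymm {a b : Option Int} (h : oLt a b = true) : oLt b a = false := by
  cases a <;> cases b <;> simp_all [oLt] <;> omega

-- b ≤ a (¬ a < b) and a < c imply b < c
theorem oLt_of_le_of_lt {a b c : Option Int} (h1 : oLt a b = false) (h2 : oLt a c = true) : oLt b c = true := by
  cases a <;> cases b <;> cases c <;> simp_all [oLt] <;> omega

-- a < b and b ≤ c (¬ c < b) imply a < c
theorem oLt_of_lt_of_le {a b c : Option Int} (h1 : oLt a b = true) (h2 : oLt c b = false) : oLt a c = true := by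
  cases a <;> cases b <;> cases c <;> simp_all [oLt] <;> omega

-- the Int argmin carries the fold-minimum of the values
theorem snd_aMinPairI (rest : List (String × Int)) (p0 : String × Int) :
    (aMinPairI p0 rest).2 = minFold p0.2 (rest.map (fun p => p.2)) := by
  induction rest generalizing p0 with
  | nil => rfl
  | cons q rs ih =>
      simp only [aMinPairI, List.foldl_cons, List.map_cons, minFold, List.foldl_cons] at *
      rw [show (if q.2 < p0.2 then q else p0) = ((if q.2 < p0.2 then q else p0) : String × Int) from rfl]
      by_cases h : q.2 < p0.2 <;> simp [h, ih]

theorem minFold_mem (vs : List Int) (v0 : Int) : minFold v0 vs ∈ v0 :: vs := by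
  induction vs generalizing v0 with
  | nil => simp [minFold]
  | cons x xs ih =>
      have h := ih (if x < v0 then x else v0)
      simp only [minFold, List.foldl_cons] at *
      rcases List.mem_cons.1 h with h1 | h1
      · rw [h1]; by_cases hx : x < v0 <;> simp [hx]
      · simp [h1]

theorem minFold_le (vs : List Int) (v0 : Int) : ∀ v ∈ v0 :: vs, minFold v0 vs ≤ v := by
  induction vs generalizing v0 with
  | nil => intro v hv; simp at hv; simp [minFold, hv]
  | cons x xs ih =>
      intro v hv
      have h := ih (if x < v0 then x else v0)
      simp only [minFold, List.foldl_cons] at *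
      have hle := h _ List.mem_cons_self
      have hite : (if x < v0 then x else v0) ≤ v0 ∧ (if x < v0 then x else v0) ≤ x := by
        split <;> omega
      rcases List.mem_cons.1 hv with rfl | hv1
      · exact le_trans hle hite.1
      · rcases List.mem_cons.1 hv1 with rfl | hv2
        · exact le_trans hle hite.2
        · exact h v (List.mem_cons_of_mem _ hv2)

-- the Option argmin: it occurs in the list, everything before it is strictly greater, nothing is smaller
theorem aMinPairO_spec (qrest : List (String × Option Int)) (q0 : String × Option Int) :
    ∃ pre post, q0 :: qrest = pre ++ (aMinPairO q0 qrest) :: post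
      ∧ (∀ p ∈ pre, oLt (aMinPairO q0 qrest).2 p.2 = true)
      ∧ (∀ p ∈ q0 :: qrest, oLt p.2 (aMinPairO q0 qrest).2 = false) := by
  induction qrest generalizing q0 with
  | nil =>
      exact ⟨[], [], rfl, by simp, by intro p hp; simp at hp; simp [hp, aMinPairO, oLt_irrefl]⟩
  | cons q rs ih =>
      have hstep : aMinPairO q0 (q :: rs) = aMinPairO (if oLt q.2 q0.2 then q else q0) rs := by
        simp [aMinPairO]
      by_cases hq : oLt q.2 q0.2 = true
      · -- the new head is beaten immediately
        simp only [hq, if_pos] at hstep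
        obtain ⟨pre', post', hdec, hpre', hmin'⟩ := ih q
        rw [hstep]
        have hqb : oLt q.2 (aMinPairO q rs).2 = false := hmin' q List.mem_cons_self
        have hbq0 : oLt (aMinPairO q rs).2 q0.2 = true := oLt_of_le_of_lt hqb hq
        refine ⟨q0 :: pre', post', by rw [List.cons_append, ← hdec], ?_, ?_⟩
        · intro p hp
          rcases List.mem_cons.1 hp with rfl | hp'
          · exact hbq0
          · exact hpre' p hp'
        · intro p hp
          rcases List.mem_cons.1 hp with rfl | hp'
          · exact oLt_asymm hbq0
          · exact hmin' p hp'
      · -- the old best survives the step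
        rw [Bool.not_eq_true] at hq
        simp only [hq, Bool.false_eq_true, if_neg, if_false] at hstep
        obtain ⟨pre', post', hdec, hpre', hmin'⟩ := ih q0
        rw [hstep]
        cases pre' with
        | nil =>
            simp only [List.nil_append] at hdec
            have hb : aMinPairO q0 rs = q0 := ((List.cons_eq_cons.1 hdec).1).symm
            refine ⟨[], q :: post', ?_, by simp, ?_⟩
            · simp only [List.nil_append]
              rw [hb]
              have hrs : rs = post' := (List.cons_eq_cons.1 hdec).2
              rw [hrs]
            · intro p hp
              rcases List.mem_cons.1 hp with rfl | hp'
              · rw [hb]; exact oLt_irrefl _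
              · rcases List.mem_cons.1 hp' with rfl | hp''
                · rw [hb]; exact hq
                · exact hmin' p (List.mem_cons_of_mem _ hp'')
        | cons a pre'' =>
            have ha : a = q0 := ((List.cons_eq_cons.1 hdec).1).symm
            have hrs : rs = pre'' ++ aMinPairO q0 rs :: post' := (List.cons_eq_cons.1 hdec).2
            have hbq0 : oLt (aMinPairO q0 rs).2 q0.2 = true := by
              have := hpre' a List.mem_cons_self; rwa [ha] at this
            have hbq : oLt (aMinPairO q0 rs).2 q.2 = true := oLt_of_lt_of_le hbq0 hq
            refine ⟨q0 :: q :: pre'', post', ?_, ?_, ?_⟩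
            · simp only [List.cons_append]
              rw [← hrs]
            · intro p hp
              rcases List.mem_cons.1 hp with rfl | hp'
              · exact hbq0
              · rcases List.mem_cons.1 hp' with rfl | hp''
                · exact hbq
                · exact hpre' p (ha ▸ List.mem_cons_of_mem a hp'')
            · intro p hp
              rcases List.mem_cons.1 hp with rfl | hp'
              · exact hmin' p List.mem_cons_self
              · rcases List.mem_cons.1 hp' with rfl | hp''
                · exact oLt_asymm hbq
                · exact hmin' p (List.mem_cons_of_mem _ hp'')

theorem infMask_fst (m : Int) (p : String × Int) : (infMask m p).1 = p.1 := by
  unfold infMask; split <;> rfl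

theorem infMask_of_eq {m : Int} {p : String × Int} (h : p.2 = m) : infMask m p = (p.1, none) := by
  simp [infMask, h]

theorem infMask_of_ne {m : Int} {p : String × Int} (h : p.2 ≠ m) : infMask m p = (p.1, some p.2) := by
  simp [infMask, h]

-- A-side heart: A's inf-overwriting scan equals the partition reference on any nonempty
-- item list with unique keys
theorem core (p0 : String × Int) (rest : List (String × Int))
    (hnd : ((p0 :: rest).map Prod.fst).Nodup) :
    aBody (p0 :: rest) = refBody (p0 :: rest) := by
  have hmA := snd_aMinPairI rest p0
  simp only [aBody, refBody]
  rw [hmA]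
  set m := minFold p0.2 (rest.map (fun p => p.2)) with hm
  set best := aMinPairO (infMask m p0) (rest.map (infMask m)) with hbest
  have hinj : ∀ p ∈ p0 :: rest, ∀ q ∈ p0 :: rest, p.1 = q.1 → p = q := by
    intro p hp q hq h; exact List.inj_on_of_nodup_map hnd hp hq h
  obtain ⟨pre, post, hdec, hpre, hmin⟩ := aMinPairO_spec (rest.map (infMask m)) (infMask m p0)
  rw [← hbest] at hdec hpre hmin
  have hmap : (p0 :: rest).map (infMask m) = infMask m p0 :: rest.map (infMask m) := List.map_cons
  have hbl : best ∈ (p0 :: rest).map (infMask m) := by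
    rw [hmap, hdec]; exact List.mem_append.2 (Or.inr List.mem_cons_self)
  obtain ⟨pb, hpbmem, hpbeq⟩ := List.mem_map.1 hbl
  cases hf : (p0 :: rest).filter (fun p => p.2 != m) with
  | nil =>
      -- every total equals the minimum: A finds the first key with value inf and ties on any second cow
      have hall : ∀ p ∈ p0 :: rest, p.2 = m := by
        intro p hp
        have h2 := List.filter_eq_nil_iff.1 hf p hp
        simpa using h2
      have hmaskall : ∀ q ∈ (p0 :: rest).map (infMask m), q.2 = (none : Option Int) := by
        intro q hq
        obtain ⟨p, hp, rfl⟩ := List.mem_map.1 hq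
        rw [infMask_of_eq (hall p hp)]
      have hb2 : best.2 = none := hmaskall best hbl
      have hprenil : pre = [] := by
        cases hpc : pre with
        | nil => rfl
        | cons a as =>
            exfalso
            have ha : a ∈ (p0 :: rest).map (infMask m) := by
              rw [hmap, hdec, hpc]; exact List.mem_append.2 (Or.inl List.mem_cons_self)
            have := hpre a (hpc ▸ List.mem_cons_self)
            rw [hb2, hmaskall a ha] at this
            simp [oLt] at this
      have hbp0 : best = infMask m p0 := by
        rw [hprenil, List.nil_append] at hdec
        exact ((List.cons_eq_cons.1 hdec).1).symm
      have hb1 : best.1 = p0.1 := by rw [hbp0, infMask_fst]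
      simp only [refSecond]
      cases rest with
      | nil =>
          simp [refTie, hbp0, infMask_fst]
      | cons r rs =>
          have hany : ((p0 :: r :: rs).map (infMask m)).any
              (fun p => p.2 == best.2 && p.1 != best.1) = true := by
            refine List.any_eq_true.2 ⟨infMask m r, ?_, ?_⟩
            · exact List.mem_map.2 ⟨r, List.mem_cons_of_mem _ List.mem_cons_self, rfl⟩
            · have hr1 : r.1 ≠ p0.1 := by
                intro he
                have := hinj r (List.mem_cons_of_mem _ List.mem_cons_self) p0 List.mem_cons_self he
                rw [this] at hnd
                simp at hnd
              have h2 : (infMask m r).2 = (none : Option Int) :=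
                hmaskall _ (List.mem_map.2 ⟨r, List.mem_cons_of_mem _ List.mem_cons_self, rfl⟩)
              simp [h2, hb2, hb1, infMask_fst, hr1]
          rw [hany]
          simp [refTie]
  | cons o os =>
      -- a genuine second group exists
      have hsub : ∀ w ∈ o :: os, w ∈ p0 :: rest ∧ w.2 ≠ m := by
        intro w hw
        rw [← hf] at hw
        have h2 := List.mem_filter.1 hw
        exact ⟨h2.1, by simpa using h2.2⟩
      have hmem_filter : ∀ p ∈ p0 :: rest, p.2 ≠ m → p ∈ o :: os := by
        intro p hp hne2
        rw [← hf]
        exact List.mem_filter.2 ⟨hp, by simpa using hne2⟩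
      obtain ⟨w, hw, hws⟩ : ∃ w ∈ o :: os, w.2 = minFold o.2 (os.map (fun p => p.2)) := by
        have h := minFold_mem (os.map (fun p => p.2)) o.2
        rcases List.mem_cons.1 h with h1 | h1
        · exact ⟨o, List.mem_cons_self, h1.symm⟩
        · obtain ⟨w, hwmem, hweq⟩ := List.mem_map.1 h1
          exact ⟨w, List.mem_cons_of_mem _ hwmem, hweq⟩
      set s := minFold o.2 (os.map (fun p => p.2)) with hsdef
      have hs_le : ∀ w' ∈ o :: os, s ≤ w'.2 := by
        intro w' hw'
        rcases List.mem_cons.1 hw' with rfl | h1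
        · exact minFold_le _ _ _ List.mem_cons_self
        · exact minFold_le _ _ _ (List.mem_cons_of_mem _ (List.mem_map.2 ⟨w', h1, rfl⟩))
      have hs_ne_m : s ≠ m := by rw [← hws]; exact (hsub w hw).2
      -- best's value is some s
      have hbne : best.2 ≠ none := by
        intro h0
        have hio : infMask m o ∈ (p0 :: rest).map (infMask m) :=
          List.mem_map.2 ⟨o, (hsub o List.mem_cons_self).1, rfl⟩
        have h1 := hmin (infMask m o) (hmap ▸ hio)
        rw [infMask_of_ne (hsub o List.mem_cons_self).2, h0] at h1
        simp [oLt] at h1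
      have hpb_ne : pb.2 ≠ m := by
        intro he
        rw [infMask_of_eq he] at hpbeq
        exact hbne (by rw [← hpbeq])
      have hbval : best = (pb.1, some pb.2) := by rw [← hpbeq, infMask_of_ne hpb_ne]
      have hpbo : pb ∈ o :: os := hmem_filter pb hpbmem hpb_ne
      have hpb_eq_s : pb.2 = s := by
        have h1 : s ≤ pb.2 := hs_le pb hpbo
        have h2 : pb.2 ≤ s := by
          have hiw : infMask m w ∈ infMask m p0 :: rest.map (infMask m) := by
            rw [← hmap]; exact List.mem_map.2 ⟨w, (hsub w hw).1, rfl⟩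
          have h3 := hmin (infMask m w) hiw
          rw [infMask_of_ne (by rw [hws]; exact hs_ne_m), hbval, hws] at h3
          simp [oLt] at h3
          exact h3
        omega
      -- the winner list
      have hws_char : ∀ p, p ∈ (o :: os).filter (fun p => p.2 == s) ↔ p ∈ p0 :: rest ∧ p.2 = s := by
        intro p
        constructor
        · intro hp
          have h1 := List.mem_filter.1 hp
          exact ⟨(hsub p h1.1).1, by simpa using h1.2⟩
        · intro ⟨hp1, hp2⟩
          exact List.mem_filter.2 ⟨hmem_filter p hp1 (hp2 ▸ hs_ne_m), by simpa using hp2⟩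
      have hpb_ws : pb ∈ (o :: os).filter (fun p => p.2 == s) :=
        (hws_char pb).2 ⟨hpbmem, hpb_eq_s⟩
      have hws_nd : (((o :: os).filter (fun p => p.2 == s)).map Prod.fst).Nodup := by
        have h1 : ((o :: os).filter (fun p => p.2 == s)).Sublist (o :: os) := List.filter_sublist
        have h2 : (o :: os).Sublist (p0 :: rest) := by rw [← hf]; exact List.filter_sublist
        exact List.Nodup.sublist (List.Sublist.map Prod.fst (h1.trans h2)) hnd
      simp only [refSecond]
      rw [← hsdef]
      cases hwsl : (o :: os).filter (fun p => p.2 == s) with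
      | nil => exact absurd (hwsl ▸ hpb_ws) (List.not_mem_nil)
      | cons w0 wrest =>
          cases wrest with
          | nil =>
              -- unique second-smallest cow: both return its name
              have hpbw0 : pb = w0 := by
                have := hwsl ▸ hpb_ws; simpa using this
              have hany : ((p0 :: rest).map (infMask m)).any
                  (fun p => p.2 == best.2 && p.1 != best.1) = false := by
                rw [List.any_eq_false]
                intro q hq
                obtain ⟨p, hp, rfl⟩ := List.mem_map.1 hq
                by_cases hpm : p.2 = m
                · rw [infMask_of_eq hpm, hbval]
                  simp
                · rw [infMask_of_ne hpm, hbval]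
                  by_cases hps : p.2 = pb.2
                  · have hpw : p ∈ (o :: os).filter (fun p => p.2 == s) :=
                      (hws_char p).2 ⟨hp, by rw [hps, hpb_eq_s]⟩
                    have : p = w0 := by have := hwsl ▸ hpw; simpa using this
                    rw [this, ← hpbw0]
                    simp
                  · simp [hps]
              rw [hany, hbval, hpbw0]
              simp [refTie]
          | cons w1 wrest2 =>
              -- at least two: both tie
              have hw01 : w0.1 ≠ w1.1 := by
                rw [hwsl] at hws_nd
                simp at hws_nd
                exact fun h => hws_nd.1.1 h
              have hw0mem : w0 ∈ (o :: os).filter (fun p => p.2 == s) := by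
                rw [hwsl]; exact List.mem_cons_self
              have hw1mem : w1 ∈ (o :: os).filter (fun p => p.2 == s) := by
                rw [hwsl]; exact List.mem_cons_of_mem _ List.mem_cons_self
              have hwit : ∃ u ∈ (o :: os).filter (fun p => p.2 == s), u.1 ≠ best.1 := by
                by_cases h0 : w0.1 = best.1
                · exact ⟨w1, hw1mem, by rw [← h0]; exact fun h => hw01 h.symm⟩
                · exact ⟨w0, hw0mem, h0⟩
              obtain ⟨u, hu, hu1⟩ := hwit
              have hany : ((p0 :: rest).map (infMask m)).any
                  (fun p => p.2 == best.2 && p.1 != best.1) = true := by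
                refine List.any_eq_true.2 ⟨infMask m u, ?_, ?_⟩
                · exact List.mem_map.2 ⟨u, ((hws_char u).1 hu).1, rfl⟩
                · have hu2 : u.2 = s := ((hws_char u).1 hu).2
                  have hu1' : u.1 ≠ pb.1 := by rw [hbval] at hu1; exact hu1
                  rw [infMask_of_ne (hu2 ▸ hs_ne_m), hbval, hu2, hpb_eq_s]
                  simp [hu1']
              rw [hany]
              simp [refTie]

-- B-side heart: the sort-and-scan equals the partition reference on any nonempty item list
theorem coreB (p0 : String × Int) (rest : List (String × Int)) :
    refBody (p0 :: rest) = bBody (p0 :: rest) := by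
  simp only [refBody, bBody]
  have hperm : (PySem.List.sorted (p0 :: rest) (fun kv => kv.2) false).Perm (p0 :: rest) :=
    PySem.List.sorted_perm _ _ _
  have hpw := PySem.List.sorted_pairwise (p0 :: rest) (fun kv => kv.2)
  cases hs : PySem.List.sorted (p0 :: rest) (fun kv => kv.2) false with
  | nil =>
      rw [hs] at hperm
      simpa using hperm.length_eq
  | cons o0 orest =>
    rw [hs] at hperm hpw
    -- min_val: the fold-minimum of the values is the head value of the sorted list
    have ho0le : ∀ y ∈ p0 :: rest, o0.2 ≤ y.2 := by
      intro y hy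
      exact PySem.List.key_head_sorted_le (p0 :: rest) (fun kv => kv.2) hs y hy
    have ho0mem : o0 ∈ p0 :: rest := hperm.mem_iff.1 List.mem_cons_self
    have hm : minFold p0.2 (rest.map (fun p => p.2)) = o0.2 := by
      have h1 : minFold p0.2 (rest.map (fun p => p.2)) ≤ o0.2 := by
        rcases List.mem_cons.1 ho0mem with h | h
        · rw [h]; exact minFold_le _ _ _ List.mem_cons_self
        · exact minFold_le _ _ _ (List.mem_cons_of_mem _ (List.mem_map.2 ⟨o0, h, rfl⟩))
      have h2 : o0.2 ≤ minFold p0.2 (rest.map (fun p => p.2)) := by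
        have hmm := minFold_mem (rest.map (fun p => p.2)) p0.2
        rcases List.mem_cons.1 hmm with h | h
        · rw [h]; exact ho0le p0 List.mem_cons_self
        · obtain ⟨q, hq, hqe⟩ := List.mem_map.1 h
          rw [← hqe]; exact ho0le q (List.mem_cons_of_mem _ hq)
      omega
    rw [hm]
    have hfperm : ((o0 :: orest).filter (fun kv => kv.2 != o0.2)).Perm
        ((p0 :: rest).filter (fun p => p.2 != o0.2)) := hperm.filter _
    cases hf : (p0 :: rest).filter (fun p => p.2 != o0.2) with
    | nil =>
        -- all totals equal the minimum: the tail is empty, fall back to the whole list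
        have hnf : (o0 :: orest).filter (fun kv => kv.2 != o0.2) = [] := by
          rw [hf] at hfperm
          exact List.eq_nil_of_length_eq_zero (by simpa using hfperm.length_eq)
        have hnf2 : orest.filter (fun kv => kv.2 != o0.2) = [] := by simpa using hnf
        simp only [refSecond]
        cases orest with
        | nil =>
            have hsing : p0 :: rest = [o0] := List.perm_singleton.1 hperm.symm
            have hp0 : p0 = o0 := (List.cons_eq_cons.1 hsing).1
            have hrest : rest = [] := (List.cons_eq_cons.1 hsing).2
            subst hrest
            simp [refTie, bPick, hp0, hnf2]
        | cons r rs =>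
            have hr : r.2 = o0.2 := by
              have := List.filter_eq_nil_iff.1 hnf r (List.mem_cons_of_mem _ List.mem_cons_self)
              simpa using this
            have hlen : (p0 :: rest).length = (o0 :: r :: rs).length := hperm.symm.length_eq
            have hlen2 : ((p0 :: rest).map (fun p => p.1)).length > 1 := by
              rw [List.length_map, hlen]; simp
            simp [refTie, bPick, hnf2, hr, hlen2]
            intro h
            rw [h] at hlen
            simp at hlen
    | cons o os =>
        have hpf : ((o0 :: orest).filter (fun kv => kv.2 != o0.2)).Perm (o :: os) := by
          rw [hf] at hfperm; exact hfperm
        cases hnf : (o0 :: orest).filter (fun kv => kv.2 != o0.2) with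
        | nil =>
            rw [hnf] at hpf
            simpa using hpf.length_eq
        | cons t0 ts =>
            rw [hnf] at hpf
            have htpw : (t0 :: ts).Pairwise (fun a b => a.2 ≤ b.2) := by
              have hsub : (t0 :: ts).Sublist (o0 :: orest) := hnf ▸ List.filter_sublist
              exact List.Pairwise.sublist hsub hpw
            have ht0le : ∀ x ∈ t0 :: ts, t0.2 ≤ x.2 := by
              intro x hx
              rcases List.mem_cons.1 hx with rfl | hx'
              · omega
              · exact (List.pairwise_cons.1 htpw).1 x hx'
            have hs_le : ∀ w ∈ o :: os, minFold o.2 (os.map (fun p => p.2)) ≤ w.2 := by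
              intro w hw
              rcases List.mem_cons.1 hw with rfl | h1
              · exact minFold_le _ _ _ List.mem_cons_self
              · exact minFold_le _ _ _ (List.mem_cons_of_mem _ (List.mem_map.2 ⟨w, h1, rfl⟩))
            have hs2 : minFold o.2 (os.map (fun p => p.2)) = t0.2 := by
              have h1 : minFold o.2 (os.map (fun p => p.2)) ≤ t0.2 :=
                hs_le t0 (hpf.mem_iff.1 List.mem_cons_self)
              have h2 : t0.2 ≤ minFold o.2 (os.map (fun p => p.2)) := by
                obtain ⟨w, hw, hws⟩ : ∃ w ∈ o :: os, w.2 = minFold o.2 (os.map (fun p => p.2)) := by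
                  have h := minFold_mem (os.map (fun p => p.2)) o.2
                  rcases List.mem_cons.1 h with h1' | h1'
                  · exact ⟨o, List.mem_cons_self, h1'.symm⟩
                  · obtain ⟨w, hwmem, hweq⟩ := List.mem_map.1 h1'
                    exact ⟨w, List.mem_cons_of_mem _ hwmem, hweq⟩
                rw [← hws]
                exact ht0le w (hpf.mem_iff.2 hw)
              omega
            have ht2 : orest.filter (fun kv => kv.2 != o0.2) = t0 :: ts := by simpa using hnf
            simp only [refSecond, hs2]
            have hwperm : ((t0 :: ts).filter (fun p => p.2 == t0.2)).Perm
                ((o :: os).filter (fun p => p.2 == t0.2)) := hpf.filter _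
            cases ts with
            | nil =>
                -- a unique non-minimal entry: its name
                have hw1 : (o :: os).filter (fun p => p.2 == t0.2) = [t0] := by
                  have : ([t0].filter (fun p => p.2 == t0.2)) = [t0] := by simp
                  rw [this] at hwperm
                  exact (List.perm_singleton.1 hwperm.symm)
                simp [hw1, refTie, bPick, ht2]
            | cons t1 ts' =>
                by_cases h1 : t1.2 = t0.2
                · -- at least two entries share the second-smallest value: tie
                  have hlenw : ((o :: os).filter (fun p => p.2 == t0.2)).length > 1 := by
                    rw [← hwperm.length_eq]
                    have hfe : ((t0 :: t1 :: ts').filter (fun p => p.2 == t0.2))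
                        = t0 :: t1 :: (ts'.filter (fun p => p.2 == t0.2)) := by
                      simp [List.filter_cons, h1]
                    rw [hfe]
                    simp
                  simp [bPick, h1, refTie, hlenw, ht2]
                · -- t0 is the unique second-smallest entry: everything after t1 is even larger
                  have ht1lt : t0.2 < t1.2 := by
                    have := (List.pairwise_cons.1 htpw).1 t1 List.mem_cons_self
                    omega
                  have hne : (t1.2 == t0.2) = false := by simp [h1]
                  have hrest0 : ts'.filter (fun p => p.2 == t0.2) = [] := by
                    rw [List.filter_eq_nil_iff]
                    intro x hx
                    have := (List.pairwise_cons.1 (List.pairwise_cons.1 htpw).2).1 x hx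
                    simp
                    omega
                  have hw1 : (o :: os).filter (fun p => p.2 == t0.2) = [t0] := by
                    have hl : (t0 :: t1 :: ts').filter (fun p => p.2 == t0.2) = [t0] := by
                      simp [List.filter_cons, hne, hrest0]
                    rw [hl] at hwperm
                    exact (List.perm_singleton.1 hwperm.symm)
                  simp [hw1, refTie, bPick, hne, ht2]

-- ===== VERDICT (by name: the statement is the Claim_ definition above) =====
theorem solve_spec : Claim_equal_solve := by
  intro n matrix hdom hpre
  unfold Spec_solve solve solve_alt
  have hkeysnd : (((matrix.foldl (fun d p => d.modify p.1 0 (fun v => v + p.2))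
      (PySem.Dict.empty : PySem.Dict String Int)).items).map Prod.fst).Nodup := by
    have h := PySem.Dict.nodup_keys_foldl_modify_key matrix Prod.fst 0 (fun _ p v => v + p.2)
      (PySem.Dict.empty : PySem.Dict String Int) (by simp)
    simpa [PySem.Dict.keys] using h
  have hne : ((matrix.foldl (fun d p => d.modify p.1 0 (fun v => v + p.2))
      (PySem.Dict.empty : PySem.Dict String Int)).items) ≠ [] := by
    cases matrix with
    | nil => exact absurd rfl hpre
    | cons x xs =>
        intro h0
        have hk := PySem.Dict.keys_foldl_modify_key (x :: xs) Prod.fst 0 (fun _ p v => v + p.2)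
          (PySem.Dict.empty : PySem.Dict String Int)
        have hx : x.1 ∈ ((x :: xs).foldl (fun d p => d.modify p.1 0 (fun v => v + p.2))
            (PySem.Dict.empty : PySem.Dict String Int)).keys := by
          rw [hk]
          exact (PySem.Set.mem_update _ _ _).2 (Or.inr (List.mem_map.2 ⟨x, List.mem_cons_self, rfl⟩))
        simp only [PySem.Dict.keys] at hx
        rw [h0] at hx
        simp at hx
  cases hitems : ((matrix.foldl (fun d p => d.modify p.1 0 (fun v => v + p.2))
      (PySem.Dict.empty : PySem.Dict String Int)).items) with
  | nil => exact absurd hitems hne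
  | cons p0 rest =>
      rw [core p0 rest (hitems ▸ hkeysnd), coreB]
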